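-- pv_equiv track=rewrite | github.com/PurityControl/uchi-komi-python | problems/euler/0007-10001st-prime/ichi/primes.py | take
-- ===== SOURCE A (Python) =====
-- def take(num, seq):
--     """Generator takes num items from seq
--
--     Args:
--       num: number of items to take from list
--
--       seq: the sequence to iterate over
--     """
--     counter = 1
--     for item in seq:
--         if counter <= num:
--             yield item
--         else:
--             return
--         counter += 1
-- ===== SOURCE B (Python) =====
-- def take(num, seq):
--     """Yield the first num items of seq by materializing the sequence and
--     slicing off its prefix (negative counts clamp to an empty slice)."""
--     yield from list(seq)[:max(0, num)]
-- ===== Notes on version B (the rewrite author's own statement) =====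
-- stated objective: simpler
-- what changed: B materializes the sequence and yields its slice [:max(0, num)] in one statement, replacing A's lazy single-pass loop with a manual counter compared against num on every item.
import Mathlib
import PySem

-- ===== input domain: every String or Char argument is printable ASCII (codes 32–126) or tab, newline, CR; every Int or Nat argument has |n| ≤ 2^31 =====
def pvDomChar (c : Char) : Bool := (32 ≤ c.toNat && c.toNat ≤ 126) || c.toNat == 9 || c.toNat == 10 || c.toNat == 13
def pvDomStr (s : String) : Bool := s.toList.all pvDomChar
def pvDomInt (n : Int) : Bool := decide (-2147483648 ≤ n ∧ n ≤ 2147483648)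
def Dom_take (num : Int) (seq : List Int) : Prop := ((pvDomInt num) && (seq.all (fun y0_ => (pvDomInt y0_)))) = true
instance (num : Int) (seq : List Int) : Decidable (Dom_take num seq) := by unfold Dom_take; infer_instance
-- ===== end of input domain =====

-- B replaces A's lazy counting loop by materializing the sequence and slicing its prefix; objective: simpler.


-- ===== PORT A =====
-- A: iterate over seq keeping counter (starting at 1); yield while counter ≤ num, else return.
def takeGo (num : Int) (counter : Int) (seq : List Int) : List Int :=
  match seq with
  | [] => []
  | item :: rest =>
      if counter ≤ num then item :: takeGo num (counter + 1) rest
      else []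

def take (num : Int) (seq : List Int) : List Int := takeGo num 1 seq

-- ===== PORT B =====
-- B: yield from list(seq)[:max(0, num)] — slice off the prefix.
def take_alt (num : Int) (seq : List Int) : List Int :=
  PySem.List.slice seq none (some (max 0 num))

-- ===== PRECONDITION & SPEC =====
def Spec_take (num : Int) (seq : List Int) (out : List Int) : Prop := out = take_alt num seq
instance (num : Int) (seq : List Int) (out : List Int) : Decidable (Spec_take num seq out) := by unfold Spec_take; infer_instance

-- ===== CLAIM =====
def Claim_equal_take : Prop := ∀ (num : Int) (seq : List Int), Dom_take num seq → Spec_take num seq (take num seq)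

-- ===== LEMMAS AND PROOFS =====
theorem takeGo_eq_take (num : Int) (seq : List Int) :
    ∀ c : Int, takeGo num c seq = seq.take (num + 1 - c).toNat := by
  induction seq with
  | nil => intro c; simp [takeGo]
  | cons x rest ih =>
      intro c
      by_cases h : c ≤ num
      · have hk : (num + 1 - c).toNat = (num + 1 - (c + 1)).toNat + 1 := by omega
        simp [takeGo, h, hk, ih (c + 1)]
      · have hk : (num + 1 - c).toNat = 0 := by omega
        simp [takeGo, h, hk]

-- ===== VERDICT =====
theorem take_spec : Claim_equal_take := by
  intro num seq _
  unfold Spec_take take take_alt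
  rw [PySem.List.slice_to]
  · rw [takeGo_eq_take num seq 1]
    congr 1
    omega
  · omega
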